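-- pv_equiv track=rewrite | github.com/aparaxsarkar/Generation-of-Fill-in-the-Blank-Questions | 6_FinalAttention.py | add_space_before_punctuation
-- ===== SOURCE A (Python) =====
-- import string
--
-- def add_space_before_punctuation(input_string):
--     punctuations = set(string.punctuation)
--     modified_string = ''
--
--     for char in input_string:
--         if char in punctuations:
--             modified_string += ' ' + char
--         else:
--             modified_string += char
--
--     return modified_string
-- ===== SOURCE B (Python) =====
-- import re
-- import string
--
-- _PUNCT_RE = re.compile('([' + re.escape(string.punctuation) + '])')
--
-- def add_space_before_punctuation(input_string):
--     return _PUNCT_RE.sub(r' \1', input_string)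
-- ===== Notes on version B (the rewrite author's own statement) =====
-- stated objective: idiomatic
-- what changed: Replaces the manual character loop with string accumulation by a single precompiled regex substitution that inserts a space before each punctuation character.
import Mathlib
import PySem

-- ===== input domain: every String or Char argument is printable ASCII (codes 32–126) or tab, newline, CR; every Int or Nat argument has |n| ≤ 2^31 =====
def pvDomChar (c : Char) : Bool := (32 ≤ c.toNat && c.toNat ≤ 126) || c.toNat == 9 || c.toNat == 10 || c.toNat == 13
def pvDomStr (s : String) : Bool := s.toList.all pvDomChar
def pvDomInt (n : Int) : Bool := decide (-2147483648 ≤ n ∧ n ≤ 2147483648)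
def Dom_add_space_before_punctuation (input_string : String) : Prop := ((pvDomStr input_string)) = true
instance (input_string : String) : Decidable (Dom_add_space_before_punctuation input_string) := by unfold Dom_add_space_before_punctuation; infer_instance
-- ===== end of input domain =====

-- ===== PORT A =====
-- header: B replaces A's scan-and-concatenate loop by one regex substitution (idiomatic); return values proved equal.
-- set(string.punctuation): the 32 ASCII punctuation characters
def pvPunctuations : PySem.Set Char :=
  PySem.Set.ofList "!\"#$%&'()*+,-./:;<=>?@[\\]^_`{|}~".toList

-- literal port of A: fold over the characters, appending to the accumulator string
def add_space_before_punctuation (input_string : String) : String :=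
  input_string.toList.foldl
    (fun modified_string char =>
      if char ∈ pvPunctuations then modified_string ++ [' ', char]
      else modified_string ++ [char])
    ([] : List Char) |> String.mk

-- ===== PORT B =====
-- re.sub("([<punct>])", r" \1", s) for this single-character class: each punctuation
-- char is replaced by ' '+itself, every other char kept; exact for this pattern.
def pvRegexRepl (c : Char) : List Char :=
  if c ∈ pvPunctuations then [' ', c] else [c]

def add_space_before_punctuation_alt (input_string : String) : String :=
  String.mk (input_string.toList.flatMap pvRegexRepl)

-- ===== PRECONDITION & SPEC =====
def Spec_add_space_before_punctuation (input_string : String) (out : String) : Prop := out = add_space_before_punctuation_alt input_string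
instance (input_string : String) (out : String) : Decidable (Spec_add_space_before_punctuation input_string out) := by unfold Spec_add_space_before_punctuation; infer_instance

-- ===== CLAIM (what is proved, stated in full; the proofs are below) =====
def Claim_equal_add_space_before_punctuation : Prop := ∀ (input_string : String), Dom_add_space_before_punctuation input_string → Spec_add_space_before_punctuation input_string (add_space_before_punctuation input_string)

-- ===== LEMMAS AND PROOFS =====
theorem pv_foldl_eq_flatMap (l : List Char) :
    l.foldl
      (fun modified_string char =>
        if char ∈ pvPunctuations then modified_string ++ [' ', char]
        else modified_string ++ [char])
      ([] : List Char) = l.flatMap pvRegexRepl := by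
  have h : (fun (acc : List Char) char =>
        if char ∈ pvPunctuations then acc ++ [' ', char] else acc ++ [char])
      = fun (acc : List Char) char => acc ++ pvRegexRepl char := by
    funext acc char
    unfold pvRegexRepl
    split <;> rfl
  rw [h, PySem.List.foldl_append_eq_flatMap pvRegexRepl l ([] : List Char)]
  simp

-- ===== VERDICT (by name: the statement is the Claim_ definition above) =====
theorem add_space_before_punctuation_spec : Claim_equal_add_space_before_punctuation := by
  intro s _
  unfold Spec_add_space_before_punctuation add_space_before_punctuation add_space_before_punctuation_alt
  simp only [pv_foldl_eq_flatMap]
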